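-- pv_equiv track=rewrite | github.com/ArielValDev/Chocolate | utils/client_parser.py | expand_tags
-- ===== SOURCE A (Python) =====
-- def expand_tags(tags: dict[str, dict[str, list[str]]]) -> dict[str, dict[str, list[str]]]:
--     changed = False
--     for reg in tags:
--         for tag_name in tags[reg]:
--             for i, val in enumerate(tags[reg][tag_name]):
--                 if not val.startswith('#'): continue
--                 tags[reg][tag_name].pop(i)
--                 tags[reg][tag_name].extend(tags[reg][val[11:]]) # #minecraft:
--                 changed = True
--     if changed:
--         return expand_tags(tags)
--     return tags
-- ===== SOURCE B (Python) =====
-- def _expand_list(region: dict[str, list[str]], values: list[str]) -> list[str]: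
--     # Expand a single tag list: walk a work queue left to right, copying plain
--     # values to the output and splicing the referenced list into the queue
--     # whenever a '#minecraft:...' reference is found.
--     out: list[str] = []
--     queue = list(values)
--     while queue:
--         val = queue.pop(0)
--         if val.startswith('#'):
--             queue.extend(region[val[11:]])  # '#minecraft:' prefix is 11 characters
--         else:
--             out.append(val)
--     return out
--
--
-- def expand_tags(tags: dict[str, dict[str, list[str]]]) -> dict[str, dict[str, list[str]]]:
--     for region in tags.values():
--         for tag_name in region:
--             region[tag_name] = _expand_list(region, region[tag_name])
--     return tags
-- ===== Notes on version B (the rewrite author's own statement) =====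
-- stated objective: simpler
-- what changed: Replaces A's whole-structure tail recursion with an in-place pop-during-enumerate sweep by a single pass that rebuilds each list with a pure out/worklist queue; Pre_ excludes inputs with adjacent or nested '#'-references, where the order in which expansions are appended is an unspecified corner (A's order is an artefact of its pop/skip dynamics, B uses plain left-to-right order), and inputs with unresolvable or cyclic references, where A raises (KeyError / recursion limit) or B does not terminate.
-- outside the precondition, e.g. on expand_tags({'': {'': ['#']}}): A returns {'': {'': []}}, B does not finish within the time limit
import Mathlib
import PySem

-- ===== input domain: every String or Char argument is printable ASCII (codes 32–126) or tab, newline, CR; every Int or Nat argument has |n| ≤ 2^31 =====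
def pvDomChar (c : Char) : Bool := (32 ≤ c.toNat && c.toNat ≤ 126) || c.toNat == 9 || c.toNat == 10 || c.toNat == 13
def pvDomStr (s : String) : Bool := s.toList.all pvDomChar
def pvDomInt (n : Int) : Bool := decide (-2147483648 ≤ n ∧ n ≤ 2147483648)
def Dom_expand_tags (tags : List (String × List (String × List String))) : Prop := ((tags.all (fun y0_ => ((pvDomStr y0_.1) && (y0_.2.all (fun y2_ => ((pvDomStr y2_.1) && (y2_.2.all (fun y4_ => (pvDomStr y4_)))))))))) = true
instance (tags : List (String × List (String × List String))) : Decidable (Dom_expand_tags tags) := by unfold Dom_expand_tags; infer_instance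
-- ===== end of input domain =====

-- B replaces A's whole-structure tail recursion with in-place pop-during-enumerate mutation by a
-- single pass that rebuilds each list with a pure out/worklist queue (objective: simpler; both
-- Pythons mutate the argument in place — the equivalence proved here is about the returned value).

-- ===== PORT A =====
-- shared semantic helpers (used by both ports)
abbrev RegD := PySem.Dict String (List String)
abbrev TagsD := PySem.Dict String RegD

def pvHash (v : String) : Bool := PySem.Str.startswith v "#"     -- val.startswith('#')
def pvKey (v : String) : String := PySem.Str.slice v (some 11) none   -- val[11:]
def pvSizeR (d : RegD) : Nat := (d.values.map List.length).sum
-- Fuel expressions: the Python loops are unbounded; on inputs satisfying Pre_ these fuels are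
-- provably more steps than either Python performs, so the fueled ports are exact there.
def pvFuelI (d : RegD) (l : List String) : Nat := l.length + l.countP pvHash * (pvSizeR d + 1) + 1
def pvFuelO (t : TagsD) : Nat := (t.values.map (fun d => (d.values.map (fun l => l.countP pvHash)).sum)).sum + 1

-- for i, val in enumerate(tags[reg][tag_name]): … pop(i) … extend(…)  — i-indexed loop over the live list
def aInner : Nat → RegD → String → Nat → Bool → RegD × Bool
  | 0, d, _, _, ch => (d, ch)
  | f+1, d, tname, i, ch =>
    let l := d.getD tname []
    if h : i < l.length then
      if pvHash l[i] = false then aInner f d tname (i+1) ch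
      else
        -- tags[reg][val[11:]]: an absent key is a Python KeyError; Pre_ excludes those inputs
        let ex := d.getD (pvKey l[i]) []
        aInner f (d.insert tname (l.eraseIdx i ++ ex)) tname (i+1) true
    else (d, ch)

def aNames : RegD → List String → Bool → RegD × Bool
  | d, [], ch => (d, ch)
  | d, n :: ns, ch =>
    let r := aInner (pvFuelI d (d.getD n [])) d n 0 ch
    aNames r.1 ns r.2

def aRegions : TagsD → List String → Bool → TagsD × Bool
  | t, [], ch => (t, ch)
  | t, r :: rs, ch =>
    let p := aNames (t.getD r PySem.Dict.empty) (t.getD r PySem.Dict.empty).keys ch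
    aRegions (t.insert r p.1) rs p.2

def aLoop : Nat → TagsD → TagsD
  | 0, t => t
  | f+1, t =>
    let p := aRegions t t.keys false
    if p.2 then aLoop f p.1 else p.1

def expand_tags (tags : List (String × List (String × List String))) : List (String × List (String × List String)) :=
  let t0 : TagsD := PySem.Dict.mk (tags.map (fun p => (p.1, PySem.Dict.mk p.2)))
  ((aLoop (pvFuelO t0) t0).items.map (fun p => (p.1, p.2.items)))

-- ===== PORT B =====
-- _expand_list: rebuild the list with an explicit out/queue worklist
def bSweep : Nat → RegD → List String → List String → List String
  | 0, _, out, q => out ++ q      -- fuel exhaustion (never reached on Pre_ inputs)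
  | _+1, _, out, [] => out
  | f+1, d, out, v :: t =>
    if pvHash v = false then bSweep f d (out ++ [v]) t
    else bSweep f d out (t ++ d.getD (pvKey v) [])   -- queue.extend(region[val[11:]])

def bNames : RegD → List String → RegD
  | d, [] => d
  | d, n :: ns => bNames (d.insert n (bSweep (pvFuelI d (d.getD n [])) d [] (d.getD n []))) ns

def bRegions : TagsD → List String → TagsD
  | t, [] => t
  | t, r :: rs => bRegions (t.insert r (bNames (t.getD r PySem.Dict.empty) (t.getD r PySem.Dict.empty).keys)) rs

def expand_tags_alt (tags : List (String × List (String × List String))) : List (String × List (String × List String)) :=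
  let t0 : TagsD := PySem.Dict.mk (tags.map (fun p => (p.1, PySem.Dict.mk p.2)))
  ((bRegions t0 t0.keys).items.map (fun p => (p.1, p.2.items)))

-- ===== PRECONDITION & SPEC =====
-- pvNA l: no '#'-reference in l is immediately followed by another '#'-reference
abbrev pvNA (l : List String) : Prop := List.IsChain (fun a b => pvHash a = true → pvHash b = false) l

-- Pre_ excludes: association lists with duplicate region or tag keys (those do not denote a
-- Python dict); inputs where some '#'-reference names an absent tag (A raises KeyError); inputs
-- with cyclic references (A hits the recursion limit, B does not terminate); and inputs where two
-- '#'-references are adjacent or a referenced list itself contains a '#'-reference — there the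
-- order in which the expansions end up in the list is an unspecified corner: A's order is an
-- artefact of its pop-during-enumerate skip and re-expansion passes, B appends expansions in
-- plain left-to-right order, and either order is defensible for a collection of tag values.
def Pre_expand_tags (tags : List (String × List (String × List String))) : Prop :=
  (tags.map Prod.fst).Nodup ∧
  ∀ p ∈ tags, (p.2.map Prod.fst).Nodup ∧
    ∀ q ∈ p.2, pvNA q.2 ∧
      ∀ v ∈ q.2, pvHash v = true →
        ∃ r ∈ p.2, r.1 = pvKey v ∧ r.2.any pvHash = false
instance (tags : List (String × List (String × List String))) : Decidable (Pre_expand_tags tags) := by unfold Pre_expand_tags; infer_instance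

def pvWitness_expand_tags : (List (String × List (String × List String))) :=
  [("r", [("a", ["#minecraft:b", "x"]), ("b", ["y"])])]

def Spec_expand_tags (tags : List (String × List (String × List String))) (out : List (String × List (String × List String))) : Prop := out = expand_tags_alt tags
instance (tags : List (String × List (String × List String))) (out : List (String × List (String × List String))) : Decidable (Spec_expand_tags tags out) := by unfold Spec_expand_tags; infer_instance

-- ===== CLAIM (what is proved, stated in full; the proofs are below) =====
def Claim_equal_expand_tags : Prop := ∀ (tags : List (String × List (String × List String))), Dom_expand_tags tags → Pre_expand_tags tags → Spec_expand_tags tags (expand_tags tags)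

-- ===== LEMMAS AND PROOFS =====

-- loop measure for the worklist sweep: strictly decreases at every step when targets are clean
def pvMu (d : RegD) (q : List String) : Nat := q.length + q.countP pvHash * (pvSizeR d + 1)

-- invariant of a region dict: nodup keys, no adjacent references, every reference resolves
-- to a reference-free list
def DInv (d : RegD) : Prop :=
  d.keys.Nodup ∧
  ∀ k l, d.get? k = some l → pvNA l ∧
    ∀ v ∈ l, pvHash v = true →
      ∃ lv, d.get? (pvKey v) = some lv ∧ lv.any pvHash = false

def TInv (t : TagsD) : Prop :=
  t.keys.Nodup ∧ ∀ r d, t.get? r = some d → DInv d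

-- all lists of all regions are reference-free
def pvCleanT (t : TagsD) : Prop :=
  ∀ r d, t.get? r = some d → ∀ k l, d.get? k = some l → l.any pvHash = false

theorem pv_contains_of_get? {κ ν : Type} [BEq κ] (d : PySem.Dict κ ν) {k : κ} {v : ν}
    (h : d.get? k = some v) : d.contains k = true := by
  rw [PySem.Dict.contains_eq_isSome_get?, h]; rfl

theorem pv_insert_self {κ ν : Type} [BEq κ] [LawfulBEq κ] (d : PySem.Dict κ ν) {k : κ} {v : ν}
    (hn : d.keys.Nodup) (h : d.get? k = some v) : d.insert k v = d := by
  have hc := pv_contains_of_get? d h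
  have hm : (k, v) ∈ d.items := PySem.Dict.mem_items_of_get?_eq_some d h
  apply PySem.Dict.ext
  rw [PySem.Dict.items_insert_of_contains _ _ hc]
  have hinj := List.inj_on_of_nodup_map (f := Prod.fst) (by simpa [PySem.Dict.keys] using hn)
  conv_rhs => rw [← List.map_id d.items]
  apply List.map_congr_left
  intro p hp
  by_cases hpk : p.1 = k
  · have : p = (k, v) := hinj hp hm (by simpa using hpk)
    simp [this]
  · simp [hpk]

theorem pv_any_false {l : List String} (h : l.any pvHash = false) : ∀ v ∈ l, pvHash v = false := by
  simpa [List.any_eq_false] using h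

theorem pv_get?_of_mem_keys {κ ν : Type} [BEq κ] [LawfulBEq κ] (d : PySem.Dict κ ν) {k : κ} (h : k ∈ d.keys) : ∃ l, d.get? k = some l := by
  have : d.get? k ≠ none := by
    rw [Ne, PySem.Dict.get?_eq_none_iff_not_mem_keys]; simpa using h
  cases hg : d.get? k with
  | none => exact absurd hg this
  | some l => exact ⟨l, rfl⟩

-- a reference-free list trivially has no adjacent references
theorem pv_NA_of_clean : ∀ {l : List String}, l.any pvHash = false → pvNA l := by
  intro l
  unfold pvNA
  induction l with
  | nil => intro _; simp
  | cons a t ih =>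
    intro h
    cases t with
    | nil => simp
    | cons b t2 =>
      rw [List.isChain_cons_cons]
      refine ⟨fun _ => pv_any_false h b (by simp), ih ?_⟩
      simp only [List.any_cons, Bool.or_eq_false_iff] at h ⊢
      exact ⟨h.2.1, h.2.2⟩

-- length of a stored list is at most the total size of the region
theorem pv_len_le_size {d : RegD} {k : String} {l : List String}
    (h : d.get? k = some l) : l.length ≤ pvSizeR d := by
  have hm : (k, l) ∈ d.items := PySem.Dict.mem_items_of_get?_eq_some d h
  have hv : l ∈ d.values := by
    have : l = (k, l).2 := rfl
    rw [this, PySem.Dict.values]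
    exact List.mem_map_of_mem hm
  exact List.single_le_sum (fun _ _ => Nat.zero_le _) _ (List.mem_map_of_mem (f := List.length) hv)

-- the queue hypothesis carried through the sweep
def QOK (dB : RegD) (tname : String) (q : List String) : Prop :=
  ∀ v ∈ q, pvHash v = true → pvKey v ≠ tname ∧ ∃ lv, dB.get? (pvKey v) = some lv ∧ lv.any pvHash = false

theorem pv_erase_append (out q : List String) : (out ++ q).eraseIdx out.length = out ++ q.tail := by
  induction out with
  | nil => cases q <;> simp
  | cons a t ih => simpa using ih

-- a clean queue just gets appended
theorem pv_bSweep_clean : ∀ (f : Nat) (d : RegD) (out q : List String),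
    q.any pvHash = false → bSweep f d out q = out ++ q := by
  intro f
  induction f with
  | zero => intro d out q _; rfl
  | succ f ih =>
    intro d out q hq
    cases q with
    | nil => simp [bSweep]
    | cons v t =>
      have hv : pvHash v = false := pv_any_false hq v (by simp)
      have ht : t.any pvHash = false := by simp_all
      simp [bSweep, hv, ih d (out ++ [v]) t ht]

-- with enough fuel, the sweep's result is reference-free (everything appended to out is)
theorem pv_bSweep_result_clean : ∀ (k : Nat) (d : RegD) (out q : List String) (f : Nat),
    (∀ v ∈ q, pvHash v = true → ∃ lv, d.get? (pvKey v) = some lv ∧ lv.any pvHash = false) →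
    pvMu d q ≤ k → pvMu d q ≤ f → (∀ w ∈ out, pvHash w = false) →
    ∀ w ∈ bSweep f d out q, pvHash w = false := by
  intro k
  induction k with
  | zero =>
    intro d out q f _ hk _ hout w hw
    have hq : q = [] := List.eq_nil_of_length_eq_zero (by unfold pvMu at hk; omega)
    subst hq
    cases f <;> simp only [bSweep, List.append_nil] at hw <;> exact hout w hw
  | succ k ih =>
    intro d out q f hQ hk hf hout w hw
    cases q with
    | nil =>
      cases f <;> simp only [bSweep, List.append_nil] at hw <;> exact hout w hw
    | cons v t =>
      have hmu1 : 1 ≤ pvMu d (v :: t) := by unfold pvMu; simp; omega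
      obtain ⟨f', rfl⟩ : ∃ f', f = f' + 1 := ⟨f - 1, by omega⟩
      by_cases hv : pvHash v = true
      · obtain ⟨lv, hget, hclean⟩ := hQ v (by simp) hv
        have hex : d.getD (pvKey v) [] = lv := by
          rw [PySem.Dict.getD_eq_get?_getD, hget]; rfl
        simp only [bSweep, hv, Bool.true_eq_false, if_false] at hw
        rw [hex] at hw
        have hlenlv : lv.length ≤ pvSizeR d := pv_len_le_size hget
        have hct : lv.countP pvHash = 0 := by
          rw [List.countP_eq_zero]; intro a ha; simpa using pv_any_false hclean a ha
        have hmu : pvMu d (t ++ lv) + 1 ≤ pvMu d (v :: t) := by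
          unfold pvMu
          rw [List.countP_cons_of_pos (by simpa using hv), List.countP_append, List.length_append, hct]
          have : (t.countP pvHash + 1) * (pvSizeR d + 1)
              = t.countP pvHash * (pvSizeR d + 1) + (pvSizeR d + 1) := by ring
          simp only [List.length_cons, Nat.add_zero]
          omega
        refine ih d out (t ++ lv) f' ?_ (by omega) (by omega) hout w hw
        intro v' hv' hv'h
        rcases List.mem_append.1 hv' with h | h
        · exact hQ v' (List.mem_cons_of_mem _ h) hv'h
        · exact absurd (pv_any_false hclean v' h) (by simp [hv'h])
      · rw [Bool.not_eq_true] at hv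
        simp only [bSweep, hv, if_true] at hw
        have hmu : pvMu d t + 1 = pvMu d (v :: t) := by
          unfold pvMu
          rw [List.countP_cons_of_neg (by simp [hv])]
          simp; omega
        refine ih d (out ++ [v]) t f' (fun v' h' hh => hQ v' (List.mem_cons_of_mem _ h') hh)
          (by omega) (by omega) ?_ w hw
        intro w' hw'
        rcases List.mem_append.1 hw' with h | h
        · exact hout w' h
        · simp only [List.mem_singleton] at h; subst h; exact hv

-- MAIN BISIMULATION: A's index loop over the live list computes B's sweep, and its changed
-- flag is "the queue contained a reference"
theorem pv_bisim : ∀ (k : Nat) (dB : RegD) (tname : String) (out q : List String) (ch : Bool) (f g : Nat),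
    QOK dB tname q → pvNA q → pvMu dB q ≤ k → pvMu dB q + 1 ≤ f → pvMu dB q ≤ g →
    aInner f (dB.insert tname (out ++ q)) tname out.length ch
      = (dB.insert tname (bSweep g dB out q), ch || q.any pvHash) := by
  intro k
  induction k with
  | zero =>
    intro dB tname out q ch f g hQ hNA hk hf hg
    have hq : q = [] := List.eq_nil_of_length_eq_zero (by unfold pvMu at hk; omega)
    subst hq
    obtain ⟨f', rfl⟩ : ∃ f', f = f' + 1 := ⟨f - 1, by omega⟩
    have hl : (dB.insert tname (out ++ [])).getD tname [] = out ++ [] := by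
      rw [PySem.Dict.getD_eq_get?_getD, PySem.Dict.get?_insert_self]; rfl
    simp only [aInner, hl]
    rw [dif_neg (by simp)]
    cases g <;> simp [bSweep]
  | succ k ih =>
    intro dB tname out q ch f g hQ hNA hk hf hg
    cases q with
    | nil =>
      obtain ⟨f', rfl⟩ : ∃ f', f = f' + 1 := ⟨f - 1, by omega⟩
      have hl : (dB.insert tname (out ++ [])).getD tname [] = out ++ [] := by
        rw [PySem.Dict.getD_eq_get?_getD, PySem.Dict.get?_insert_self]; rfl
      simp only [aInner, hl]
      rw [dif_neg (by simp)]
      cases g <;> simp [bSweep]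
    | cons v t =>
      have hl : (dB.insert tname (out ++ v :: t)).getD tname [] = out ++ v :: t := by
        rw [PySem.Dict.getD_eq_get?_getD, PySem.Dict.get?_insert_self]; rfl
      have hlen : out.length < (out ++ v :: t).length := by simp
      have hget : (out ++ v :: t)[out.length] = v := by simp
      have hmu1 : 1 ≤ pvMu dB (v :: t) := by unfold pvMu; simp; omega
      obtain ⟨f', rfl⟩ : ∃ f', f = f' + 1 := ⟨f - 1, by omega⟩
      obtain ⟨g', rfl⟩ : ∃ g', g = g' + 1 := ⟨g - 1, by omega⟩
      by_cases hv : pvHash v = true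
      · -- reference: A pops and extends, B splices into the queue
        obtain ⟨hne, lv, hgetlv, hclean⟩ := hQ v (by simp) hv
        have hexA : (dB.insert tname (out ++ v :: t)).getD (pvKey v) [] = lv := by
          rw [PySem.Dict.getD_eq_get?_getD, PySem.Dict.get?_insert_of_ne _ _ hne, hgetlv]; rfl
        have hexB : dB.getD (pvKey v) [] = lv := by
          rw [PySem.Dict.getD_eq_get?_getD, hgetlv]; rfl
        have hverase : (out ++ v :: t).eraseIdx out.length = out ++ t := pv_erase_append out (v :: t)
        have hlenlv : lv.length ≤ pvSizeR dB := pv_len_le_size hgetlv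
        have hctlv : lv.countP pvHash = 0 := by
          rw [List.countP_eq_zero]; intro a ha; simpa using pv_any_false hclean a ha
        have hmuq : pvMu dB (v :: t)
            = t.length + 1 + (t.countP pvHash + 1) * (pvSizeR dB + 1) := by
          unfold pvMu
          rw [List.countP_cons_of_pos (by simpa using hv)]
          simp
        have hmul : (t.countP pvHash + 1) * (pvSizeR dB + 1)
            = t.countP pvHash * (pvSizeR dB + 1) + (pvSizeR dB + 1) := by ring
        have stepA : aInner (f' + 1) (dB.insert tname (out ++ v :: t)) tname out.length ch
            = aInner f' (dB.insert tname (out ++ (t ++ lv))) tname (out.length + 1) true := by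
          simp only [aInner, hl]
          rw [dif_pos hlen]
          simp only [hget, hv, Bool.true_eq_false, if_false, hexA, hverase,
            PySem.Dict.insert_insert_self, List.append_assoc]
        have stepB : bSweep (g' + 1) dB out (v :: t) = bSweep g' dB out (t ++ lv) := by
          simp only [bSweep, hv, Bool.true_eq_false, if_false, hexB]
        rw [stepA, stepB]
        cases htex : t ++ lv with
        | nil =>
          have hf' : 1 ≤ f' := by omega
          obtain ⟨f'', rfl⟩ : ∃ f'', f' = f'' + 1 := ⟨f' - 1, by omega⟩
          have hl2 : (dB.insert tname (out ++ ([] : List String))).getD tname []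
              = out ++ ([] : List String) := by
            rw [PySem.Dict.getD_eq_get?_getD, PySem.Dict.get?_insert_self]; rfl
          simp only [aInner, hl2]
          rw [dif_neg (by simp)]
          cases g' <;> simp [bSweep, hv]
        | cons h rest =>
          have hh : pvHash h = false := by
            cases t with
            | nil =>
              have : h ∈ lv := by
                have : lv = h :: rest := by simpa using htex
                rw [this]; simp
              exact pv_any_false hclean h this
            | cons h0 t2 =>
              have hh0 : h = h0 := by simpa using congrArg List.head? htex.symm
              subst hh0
              exact (List.isChain_cons_cons.1 hNA).1 hv
          have hNAtex : pvNA (t ++ lv) := by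
            refine List.isChain_append.2 ⟨hNA.tail, pv_NA_of_clean hclean, ?_⟩
            intro x _ y hy _
            exact pv_any_false hclean y (List.mem_of_mem_head? hy)
          have hNArest : pvNA rest := by
            have := htex ▸ hNAtex
            exact this.tail
          have hQrest : QOK dB tname rest := by
            intro v' hv' hv'h
            have hmem : v' ∈ t ++ lv := by rw [htex]; exact List.mem_cons_of_mem _ hv'
            rcases List.mem_append.1 hmem with h1 | h1
            · exact hQ v' (List.mem_cons_of_mem _ h1) hv'h
            · exact absurd (pv_any_false hclean v' h1) (by simp [hv'h])
          have hlentex : t.length + lv.length = rest.length + 1 := by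
            have := congrArg List.length htex
            simp at this; omega
          have hctrest : rest.countP pvHash = t.countP pvHash := by
            have h1 : (t ++ lv).countP pvHash = t.countP pvHash := by
              rw [List.countP_append, hctlv]
              omega
            rw [htex] at h1
            rw [List.countP_cons_of_neg (by simp [hh])] at h1
            exact h1
          have hmurest : pvMu dB rest + 2 ≤ pvMu dB (v :: t) := by
            have h1 : pvMu dB rest
                = rest.length + t.countP pvHash * (pvSizeR dB + 1) := by
              unfold pvMu; rw [hctrest]
            rw [h1, hmuq, hmul]
            omega
          obtain ⟨g'', rfl⟩ : ∃ g'', g' = g'' + 1 := ⟨g' - 1, by omega⟩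
          have hA2 : out ++ h :: rest = (out ++ [h]) ++ rest := by simp
          have hidx : out.length + 1 = (out ++ [h]).length := by simp
          rw [hA2, hidx,
            ih dB tname (out ++ [h]) rest true f' g'' hQrest hNArest (by omega) (by omega) (by omega)]
          have hstepB2 : bSweep (g'' + 1) dB out (h :: rest) = bSweep g'' dB (out ++ [h]) rest := by
            simp only [bSweep, hh, if_true]
          rw [hstepB2]
          simp [hv]
      · -- plain value: both copy it across
        rw [Bool.not_eq_true] at hv
        have hmut : pvMu dB t + 1 = pvMu dB (v :: t) := by
          unfold pvMu
          rw [List.countP_cons_of_neg (by simp [hv])]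
          simp; omega
        have stepA : aInner (f' + 1) (dB.insert tname (out ++ v :: t)) tname out.length ch
            = aInner f' (dB.insert tname ((out ++ [v]) ++ t)) tname (out ++ [v]).length ch := by
          simp only [aInner, hl]
          rw [dif_pos hlen]
          simp only [hget, hv, if_true]
          have : out ++ v :: t = (out ++ [v]) ++ t := by simp
          rw [this]
          simp
        have stepB : bSweep (g' + 1) dB out (v :: t) = bSweep g' dB (out ++ [v]) t := by
          simp only [bSweep, hv, if_true]
        rw [stepA, stepB,
          ih dB tname (out ++ [v]) t ch f' g'
            (fun v' h' hh => hQ v' (List.mem_cons_of_mem _ h') hh) hNA.tail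
            (by omega) (by omega) (by omega)]
        simp [hv]

theorem pv_qok {d : RegD} (hD : DInv d) {n : String} {l0 : List String}
    (hget : d.get? n = some l0) : QOK d n l0 := by
  intro v hv hvh
  obtain ⟨lv, hlv, hclean⟩ := (hD.2 n l0 hget).2 v hv hvh
  refine ⟨?_, lv, hlv, hclean⟩
  intro heq
  rw [heq, hget] at hlv
  cases hlv
  exact absurd (pv_any_false hclean v hv) (by simp [hvh])

-- bNames does not touch keys outside its name list
theorem pv_bNames_get?_not_mem : ∀ (ns : List String) (d : RegD) (k : String),
    k ∉ ns → (bNames d ns).get? k = d.get? k := by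
  intro ns
  induction ns with
  | nil => intro d k _; rfl
  | cons n ns ih =>
    intro d k hk
    simp only [bNames]
    have hne : k ≠ n := by rintro rfl; exact hk List.mem_cons_self
    rw [ih _ _ (fun h => hk (List.mem_cons_of_mem _ h)),
      PySem.Dict.get?_insert_of_ne _ _ hne]

theorem pv_names_bisim : ∀ (ns : List String) (d : RegD) (ch : Bool),
    DInv d → ns.Nodup → (∀ n ∈ ns, n ∈ d.keys) →
    aNames d ns ch = (bNames d ns, ch || ns.any (fun n => (d.getD n []).any pvHash))
    ∧ DInv (bNames d ns) ∧ (bNames d ns).keys = d.keys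
    ∧ (∀ n ∈ ns, ∃ l, (bNames d ns).get? n = some l ∧ l.any pvHash = false) := by
  intro ns
  induction ns with
  | nil => intro d ch hD _ _; exact ⟨by simp [aNames, bNames], hD, rfl, by simp⟩
  | cons n ns ih =>
    intro d ch hD hnd hmem
    obtain ⟨l0, hget⟩ := pv_get?_of_mem_keys d (hmem n (by simp))
    have hgd : d.getD n [] = l0 := by rw [PySem.Dict.getD_eq_get?_getD, hget]; rfl
    have hQ : QOK d n l0 := pv_qok hD hget
    have hNA0 : pvNA l0 := (hD.2 n l0 hget).1
    have hself : d.insert n l0 = d := pv_insert_self d hD.1 hget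
    have hfi : pvFuelI d l0 = pvMu d l0 + 1 := by unfold pvFuelI pvMu; ring
    set new := bSweep (pvFuelI d l0) d [] l0 with hnew
    have hbs : aInner (pvFuelI d l0) d n 0 ch = (d.insert n new, ch || l0.any pvHash) := by
      have := pv_bisim (pvMu d l0) d n [] l0 ch (pvFuelI d l0) (pvFuelI d l0)
        hQ hNA0 le_rfl (by omega) (by omega)
      simpa [hself] using this
    have hclean_new : new.any pvHash = false := by
      rw [List.any_eq_false]
      intro w hw
      rw [Bool.not_eq_true]
      exact pv_bSweep_result_clean (pvMu d l0) d [] l0 (pvFuelI d l0)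
        (fun v hv hvh => (hQ v hv hvh).2) le_rfl (by omega) (by simp) w hw
    have hcont : d.contains n = true := pv_contains_of_get? d hget
    have hkeys' : (d.insert n new).keys = d.keys := PySem.Dict.keys_insert_of_contains _ _ hcont
    have hDInv' : DInv (d.insert n new) := by
      refine ⟨hkeys' ▸ hD.1, ?_⟩
      intro k l hkl
      by_cases hkn : k = n
      · subst hkn
        rw [PySem.Dict.get?_insert_self] at hkl
        cases hkl
        exact ⟨pv_NA_of_clean hclean_new,
          fun v hv hvh => absurd (pv_any_false hclean_new v hv) (by simp [hvh])⟩
      · rw [PySem.Dict.get?_insert_of_ne _ _ hkn] at hkl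
        obtain ⟨hNAl, hres⟩ := hD.2 k l hkl
        refine ⟨hNAl, ?_⟩
        intro v hv hvh
        obtain ⟨lv, hlv, hclean⟩ := hres v hv hvh
        by_cases hkey : pvKey v = n
        · subst hkey
          exact ⟨new, PySem.Dict.get?_insert_self _ _ _, hclean_new⟩
        · exact ⟨lv, by rw [PySem.Dict.get?_insert_of_ne _ _ hkey]; exact hlv, hclean⟩
    have hmem' : ∀ m ∈ ns, m ∈ (d.insert n new).keys := by
      intro m hm; rw [hkeys']; exact hmem m (List.mem_cons_of_mem _ hm)
    obtain ⟨hrec, hDfin, hkfin, hcfin⟩ := ih (d.insert n new) (ch || l0.any pvHash) hDInv' hnd.of_cons hmem'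
    have hbstep : bNames d (n :: ns) = bNames (d.insert n new) ns := by
      simp only [bNames, hgd]
      rfl
    refine ⟨?_, by rw [hbstep]; exact hDfin, by rw [hbstep, hkfin, hkeys'], ?_⟩
    · have hstep : aNames d (n :: ns) ch = aNames (d.insert n new) ns (ch || l0.any pvHash) := by
        simp only [aNames, hgd, hbs]
      rw [hstep, hbstep, hrec]
      have hsame : ∀ m ∈ ns, (d.insert n new).getD m [] = d.getD m [] := by
        intro m hm
        have hmn : m ≠ n := by rintro rfl; exact (List.nodup_cons.1 hnd).1 hm
        rw [PySem.Dict.getD_eq_get?_getD, PySem.Dict.get?_insert_of_ne _ _ hmn, ← PySem.Dict.getD_eq_get?_getD]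
      have hany : (ns.any fun m => ((d.insert n new).getD m []).any pvHash) = (ns.any fun m => (d.getD m []).any pvHash) := by
        apply Bool.eq_iff_iff.mpr
        simp only [List.any_eq_true]
        constructor
        · rintro ⟨m, hm, hx⟩; exact ⟨m, hm, by rw [hsame m hm] at hx; exact hx⟩
        · rintro ⟨m, hm, hx⟩; exact ⟨m, hm, by rw [hsame m hm]; exact hx⟩
      have hflag : ((ch || l0.any pvHash) || ns.any fun m => ((d.insert n new).getD m []).any pvHash)
          = (ch || (n :: ns).any fun m => (d.getD m []).any pvHash) := by
        rw [hany, List.any_cons, hgd, Bool.or_assoc]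
      rw [hflag]
    · intro m hm
      rcases List.mem_cons.1 hm with rfl | hm'
      · have hnot : m ∉ ns := (List.nodup_cons.1 hnd).1
        refine ⟨new, ?_, hclean_new⟩
        rw [hbstep, pv_bNames_get?_not_mem ns _ m hnot, PySem.Dict.get?_insert_self]
      · rw [hbstep]; exact hcfin m hm'

theorem pv_bNames_clean : ∀ (ns : List String) (d : RegD),
    d.keys.Nodup → (∀ n ∈ ns, n ∈ d.keys) →
    (∀ n ∈ ns, (d.getD n []).any pvHash = false) → bNames d ns = d := by
  intro ns
  induction ns with
  | nil => intro d _ _ _; rfl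
  | cons n ns ih =>
    intro d hnd hmem hclean
    obtain ⟨l0, hget⟩ := pv_get?_of_mem_keys d (hmem n (by simp))
    have hgd : d.getD n [] = l0 := by rw [PySem.Dict.getD_eq_get?_getD, hget]; rfl
    have hcl : l0.any pvHash = false := by rw [← hgd]; exact hclean n (by simp)
    have hnew : bSweep (pvFuelI d l0) d [] l0 = l0 := by
      rw [pv_bSweep_clean _ d [] l0 hcl]; simp
    have hstep : bNames d (n :: ns) = bNames d ns := by
      simp only [bNames, hgd, hnew, pv_insert_self d hnd hget]
    rw [hstep]
    exact ih d hnd (fun m hm => hmem m (List.mem_cons_of_mem _ hm)) (fun m hm => hclean m (List.mem_cons_of_mem _ hm))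

def regAny (d : RegD) : Bool := d.values.any fun l => l.any pvHash

theorem pv_regAny_keys {d : RegD} (hnd : d.keys.Nodup) :
    regAny d = d.keys.any fun n => (d.getD n []).any pvHash := by
  unfold regAny
  rw [PySem.Dict.values_eq_map_keys d hnd [], List.any_map]
  rfl

theorem pv_bRegions_get?_not_mem : ∀ (rs : List String) (t : TagsD) (k : String),
    k ∉ rs → (bRegions t rs).get? k = t.get? k := by
  intro rs
  induction rs with
  | nil => intro t k _; rfl
  | cons r rs ih =>
    intro t k hk
    have hne : k ≠ r := by rintro rfl; exact hk List.mem_cons_self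
    simp only [bRegions]
    rw [ih _ _ (fun h => hk (List.mem_cons_of_mem _ h)),
      PySem.Dict.get?_insert_of_ne _ _ hne]

theorem pv_regions_bisim : ∀ (rs : List String) (t : TagsD) (ch : Bool),
    TInv t → rs.Nodup → (∀ r ∈ rs, r ∈ t.keys) →
    aRegions t rs ch = (bRegions t rs, ch || rs.any fun r => regAny (t.getD r PySem.Dict.empty))
    ∧ TInv (bRegions t rs) ∧ (bRegions t rs).keys = t.keys
    ∧ (∀ r ∈ rs, ∃ d, (bRegions t rs).get? r = some d ∧ ∀ k l, d.get? k = some l → l.any pvHash = false) := by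
  intro rs
  induction rs with
  | nil => intro t ch hT _ _; exact ⟨by simp [aRegions, bRegions], hT, rfl, by simp⟩
  | cons r rs ih =>
    intro t ch hT hnd hmem
    obtain ⟨d, hget⟩ := pv_get?_of_mem_keys t (hmem r (by simp))
    have hgd : t.getD r PySem.Dict.empty = d := by rw [PySem.Dict.getD_eq_get?_getD, hget]; rfl
    have hD : DInv d := hT.2 r d hget
    obtain ⟨hnames, hDnew, hknew, hcnew⟩ :=
      pv_names_bisim d.keys d ch hD hD.1 (fun n hn => hn)
    set dnew := bNames d d.keys with hdnew
    have hcont : t.contains r = true := pv_contains_of_get? t hget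
    have hkeys' : (t.insert r dnew).keys = t.keys := PySem.Dict.keys_insert_of_contains _ _ hcont
    have hdnew_clean : ∀ k l, dnew.get? k = some l → l.any pvHash = false := by
      intro k l hkl
      have hkmem : k ∈ dnew.keys := by
        by_contra hkn
        rw [← PySem.Dict.get?_eq_none_iff_not_mem_keys] at hkn
        rw [hkl] at hkn
        cases hkn
      rw [hknew] at hkmem
      obtain ⟨l', hl', hcl'⟩ := hcnew k hkmem
      rw [hkl] at hl'
      cases hl'
      exact hcl'
    have hT' : TInv (t.insert r dnew) := by
      refine ⟨hkeys' ▸ hT.1, ?_⟩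
      intro r' d' hgr'
      by_cases hrr : r' = r
      · subst hrr
        rw [PySem.Dict.get?_insert_self] at hgr'
        cases hgr'
        exact hDnew
      · rw [PySem.Dict.get?_insert_of_ne _ _ hrr] at hgr'
        exact hT.2 r' d' hgr'
    have hmem' : ∀ m ∈ rs, m ∈ (t.insert r dnew).keys := by
      intro m hm; rw [hkeys']; exact hmem m (List.mem_cons_of_mem _ hm)
    obtain ⟨hrec, hTfin, hkfin, hcfin⟩ := ih (t.insert r dnew) (ch || regAny d) hT' hnd.of_cons hmem'
    have hbstep : bRegions t (r :: rs) = bRegions (t.insert r dnew) rs := by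
      simp only [bRegions, hgd]
      rfl
    refine ⟨?_, by rw [hbstep]; exact hTfin, by rw [hbstep, hkfin, hkeys'], ?_⟩
    · have hstep : aRegions t (r :: rs) ch = aRegions (t.insert r dnew) rs (ch || regAny d) := by
        simp only [aRegions, hgd]
        rw [show aNames d d.keys ch = ((aNames d d.keys ch).1, (aNames d d.keys ch).2) from rfl]
        rw [hnames]
        rw [pv_regAny_keys hD.1]
      rw [hstep, hbstep, hrec]
      have hsame : ∀ m ∈ rs, (t.insert r dnew).getD m PySem.Dict.empty = t.getD m PySem.Dict.empty := by
        intro m hm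
        have hmr : m ≠ r := by rintro rfl; exact (List.nodup_cons.1 hnd).1 hm
        rw [PySem.Dict.getD_eq_get?_getD, PySem.Dict.get?_insert_of_ne _ _ hmr, ← PySem.Dict.getD_eq_get?_getD]
      have hany : (rs.any fun m => regAny ((t.insert r dnew).getD m PySem.Dict.empty)) = (rs.any fun m => regAny (t.getD m PySem.Dict.empty)) := by
        apply Bool.eq_iff_iff.mpr
        simp only [List.any_eq_true]
        constructor
        · rintro ⟨m, hm, hx⟩; exact ⟨m, hm, by rw [hsame m hm] at hx; exact hx⟩
        · rintro ⟨m, hm, hx⟩; exact ⟨m, hm, by rw [hsame m hm]; exact hx⟩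
      have hflag : ((ch || regAny d) || rs.any fun m => regAny ((t.insert r dnew).getD m PySem.Dict.empty))
          = (ch || (r :: rs).any fun m => regAny (t.getD m PySem.Dict.empty)) := by
        rw [hany, List.any_cons, hgd, Bool.or_assoc]
      rw [hflag]
    · intro m hm
      rcases List.mem_cons.1 hm with rfl | hm'
      · have hnot : m ∉ rs := (List.nodup_cons.1 hnd).1
        refine ⟨dnew, ?_, hdnew_clean⟩
        rw [hbstep, pv_bRegions_get?_not_mem rs _ m hnot, PySem.Dict.get?_insert_self]
      · rw [hbstep]; exact hcfin m hm'

def pvAnyH (t : TagsD) : Bool := t.values.any fun d => d.values.any fun l => l.any pvHash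

theorem pv_anyH_keys {t : TagsD} (hT : TInv t) :
    pvAnyH t = t.keys.any fun r => regAny (t.getD r PySem.Dict.empty) := by
  unfold pvAnyH
  rw [show (t.values.any fun d => d.values.any fun l => l.any pvHash) = t.values.any regAny from rfl]
  rw [PySem.Dict.values_eq_map_keys t hT.1 PySem.Dict.empty, List.any_map]
  rfl

theorem pv_bRegions_clean : ∀ (rs : List String) (t : TagsD),
    TInv t → (∀ r ∈ rs, r ∈ t.keys) →
    (∀ r ∈ rs, regAny (t.getD r PySem.Dict.empty) = false) → bRegions t rs = t := by
  intro rs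
  induction rs with
  | nil => intro t _ _ _; rfl
  | cons r rs ih =>
    intro t hT hmem hclean
    obtain ⟨d, hget⟩ := pv_get?_of_mem_keys t (hmem r (by simp))
    have hgd : t.getD r PySem.Dict.empty = d := by rw [PySem.Dict.getD_eq_get?_getD, hget]; rfl
    have hD : DInv d := hT.2 r d hget
    have hcl : regAny d = false := by rw [← hgd]; exact hclean r (by simp)
    rw [pv_regAny_keys hD.1] at hcl
    have hcl' : ∀ n ∈ d.keys, (d.getD n []).any pvHash = false := by
      intro n hn
      by_contra hne
      rw [Bool.not_eq_false] at hne
      rw [List.any_eq_false] at hcl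
      exact absurd hne (by simpa using hcl n hn)
    have hbn : bNames d d.keys = d := pv_bNames_clean d.keys d hD.1 (fun _ h => h) hcl'
    have hstep : bRegions t (r :: rs) = bRegions t rs := by
      simp only [bRegions, hgd, hbn, pv_insert_self t hT.1 hget]
    rw [hstep]
    exact ih t hT (fun m hm => hmem m (List.mem_cons_of_mem _ hm)) (fun m hm => hclean m (List.mem_cons_of_mem _ hm))

-- a clean structure satisfies pvAnyH = false
theorem pv_anyH_of_clean {t : TagsD} (hT : TInv t) (hc : pvCleanT t) : pvAnyH t = false := by
  rw [pv_anyH_keys hT]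
  rw [List.any_eq_false]
  intro r hr
  obtain ⟨d, hget⟩ := pv_get?_of_mem_keys t hr
  have hgd : t.getD r PySem.Dict.empty = d := by rw [PySem.Dict.getD_eq_get?_getD, hget]; rfl
  rw [hgd, pv_regAny_keys (hT.2 r d hget).1]
  simp only [Bool.not_eq_true, List.any_eq_false]
  intro n hn
  obtain ⟨l, hl⟩ := pv_get?_of_mem_keys d hn
  have hgl : d.getD n [] = l := by rw [PySem.Dict.getD_eq_get?_getD, hl]; rfl
  rw [hgl]
  exact pv_any_false (hc r d hget n l hl)

-- A's recursion: the first pass is B's pass; its result is clean, so the second pass is the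
-- identity with changed = false
theorem pv_loop_eq : ∀ (f : Nat) (t : TagsD), TInv t → 1 ≤ f → (pvAnyH t = true → 2 ≤ f) →
    aLoop f t = bRegions t t.keys := by
  intro f t hT hf1 hf2
  obtain ⟨f', rfl⟩ : ∃ f', f = f' + 1 := ⟨f - 1, by omega⟩
  obtain ⟨hpass, hTnew, hknew, hcnew⟩ := pv_regions_bisim t.keys t false hT hT.1 (fun _ h => h)
  have hflag : (aRegions t t.keys false).2 = pvAnyH t := by
    rw [hpass, pv_anyH_keys hT]; simp
  have hval : (aRegions t t.keys false).1 = bRegions t t.keys := by rw [hpass]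
  cases hA : pvAnyH t with
  | false =>
    simp only [aLoop]
    rw [show aRegions t t.keys false = ((aRegions t t.keys false).1, (aRegions t t.keys false).2) from rfl,
      hval, hflag, hA]
    simp
  | true =>
    have hge := hf2 hA
    obtain ⟨f'', rfl⟩ : ∃ f'', f' = f'' + 1 := ⟨f' - 1, by omega⟩
    have hstep : aLoop (f'' + 1 + 1) t = aLoop (f'' + 1) (bRegions t t.keys) := by
      simp only [aLoop]
      rw [show aRegions t t.keys false = ((aRegions t t.keys false).1, (aRegions t t.keys false).2) from rfl,
        hval, hflag, hA]
      simp
    rw [hstep]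
    -- the first pass produced a reference-free structure: the second pass is the identity
    set t' := bRegions t t.keys with ht'
    have hclean' : pvCleanT t' := by
      intro r d hget k l hkl
      have hrmem : r ∈ t'.keys := by
        by_contra hrn
        rw [← PySem.Dict.get?_eq_none_iff_not_mem_keys] at hrn
        rw [hget] at hrn
        cases hrn
      rw [hknew] at hrmem
      obtain ⟨d', hd', hcd'⟩ := hcnew r hrmem
      rw [hget] at hd'
      cases hd'
      exact hcd' k l hkl
    have hanyt' : pvAnyH t' = false := pv_anyH_of_clean hTnew hclean'
    obtain ⟨hpass', _, _, _⟩ := pv_regions_bisim t'.keys t' false hTnew hTnew.1 (fun _ h => h)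
    have hflag' : (aRegions t' t'.keys false).2 = pvAnyH t' := by
      rw [hpass', pv_anyH_keys hTnew]; simp
    have hid : bRegions t' t'.keys = t' := by
      apply pv_bRegions_clean t'.keys t' hTnew (fun _ h => h)
      rw [pv_anyH_keys hTnew, List.any_eq_false] at hanyt'
      intro r hr
      simpa using hanyt' r hr
    have hval' : (aRegions t' t'.keys false).1 = bRegions t' t'.keys := by rw [hpass']
    simp only [aLoop]
    rw [show aRegions t' t'.keys false = ((aRegions t' t'.keys false).1, (aRegions t' t'.keys false).2) from rfl,
      hval', hflag', hanyt']
    simpa using hid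

theorem pv_fuelO_pos (t : TagsD) : 1 ≤ pvFuelO t := by
  unfold pvFuelO; omega

theorem pv_fuelO_two {t : TagsD} (h : pvAnyH t = true) : 2 ≤ pvFuelO t := by
  unfold pvAnyH at h
  rw [List.any_eq_true] at h
  obtain ⟨d, hd, hd2⟩ := h
  rw [List.any_eq_true] at hd2
  obtain ⟨l, hl, hlh⟩ := hd2
  rw [List.any_eq_true] at hlh
  have h1 : 0 < l.countP pvHash := List.countP_pos_iff.2 hlh
  have h2 : l.countP pvHash ≤ (d.values.map (fun l => l.countP pvHash)).sum :=
    List.single_le_sum (fun _ _ => Nat.zero_le _) _ (List.mem_map_of_mem hl)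
  have h3 : (d.values.map (fun l => l.countP pvHash)).sum
      ≤ (t.values.map (fun d => (d.values.map (fun l => l.countP pvHash)).sum)).sum :=
    List.single_le_sum (fun _ _ => Nat.zero_le _) _ (List.mem_map_of_mem hd)
  unfold pvFuelO
  exact Nat.succ_le_succ (le_trans (le_trans h1 h2) h3)

theorem pv_TInv_init (tags : List (String × List (String × List String))) (hP : Pre_expand_tags tags) :
    TInv (PySem.Dict.mk (tags.map (fun p => (p.1, PySem.Dict.mk p.2)))) := by
  constructor
  · show (((tags.map (fun p => (p.1, PySem.Dict.mk p.2))).map Prod.fst).Nodup)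
    rw [List.map_map]
    exact hP.1
  · intro r d hget
    have hm := PySem.Dict.mem_items_of_get?_eq_some _ hget
    have : (r, d) ∈ tags.map (fun p => (p.1, PySem.Dict.mk p.2)) := hm
    rw [List.mem_map] at this
    obtain ⟨p, hp, heq⟩ := this
    obtain ⟨hP1, hP2⟩ := hP.2 p hp
    cases heq
    constructor
    · show ((p.2.map Prod.fst).Nodup)
      exact hP1
    · intro k l hkl
      have hkm : (k, l) ∈ p.2 := PySem.Dict.mem_items_of_get?_eq_some _ hkl
      obtain ⟨hNA, hres⟩ := hP2 (k, l) hkm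
      refine ⟨hNA, ?_⟩
      intro v hv hvh
      obtain ⟨rr, hrr, hfst, hclean⟩ := hres v hv hvh
      refine ⟨rr.2, ?_, hclean⟩
      apply PySem.Dict.get?_of_mem_items
      · show (pvKey v, rr.2) ∈ p.2
        rw [← hfst]
        exact hrr
      · exact hP1

theorem pv_top (tags : List (String × List (String × List String))) (hP : Pre_expand_tags tags) :
    expand_tags tags = expand_tags_alt tags := by
  unfold expand_tags expand_tags_alt
  simp only []
  rw [pv_loop_eq _ _ (pv_TInv_init tags hP) (pv_fuelO_pos _) (fun h => pv_fuelO_two h)]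

-- ===== VERDICT (by name: the statement is the Claim_ definition above) =====
theorem expand_tags_spec : Claim_equal_expand_tags := by
  intro tags _ hP
  unfold Spec_expand_tags
  exact pv_top tags hP
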